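-- pv_equiv track=rewrite | github.com/viviendoen360/polla-mundialista-2026 | polla_app.py | resolve_user_team
-- ===== SOURCE A (Python) =====
-- def get_match_by_id(matches_dict, m_id):
--     for phase, m_list in matches_dict.items():
--         for m in m_list:
--             if m["id"] == m_id: return m
--     return None
--
-- def resolve_user_team(m_id, slot, matches_dict, user_preds):
--     p = get_match_by_id(matches_dict, m_id)
--     if f"origen{slot}" in p:
--         origen_id = p[f"origen{slot}"]
--         clasifica = user_preds.get(origen_id, {}).get("clasifica")
--         if clasifica == "equipo1": return resolve_user_team(origen_id, 1, matches_dict, user_preds)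
--         elif clasifica == "equipo2": return resolve_user_team(origen_id, 2, matches_dict, user_preds)
--         else: return "Por Definir"
--     else:
--         base_name = p.get(f"equipo{slot}")
--         if m_id.startswith("O"): # Si es octavos, el usuario selecciona el equipo de la lista
--             return user_preds.get(m_id, {}).get(f"equipo{slot}", base_name)
--         return base_name
-- ===== SOURCE B (Python) =====
-- # B: iterative resolution instead of A's recursion-with-rescan: build an id->match
-- # index once, follow the origen chain in a while-loop driven by a clasifica->slot
-- # dispatch table, and apply the base/override lookup once after the loop.
-- def resolve_user_team(m_id, slot, matches_dict, user_preds):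
--     index = {}
--     for m_list in matches_dict.values():
--         for m in m_list:
--             if "id" in m:
--                 index.setdefault(m["id"], m)
--     NEXT_SLOT = {"equipo1": 1, "equipo2": 2}
--     p = index.get(m_id)
--     while f"origen{slot}" in p:
--         origen_id = p[f"origen{slot}"]
--         nxt = NEXT_SLOT.get(user_preds.get(origen_id, {}).get("clasifica"))
--         if nxt is None:
--             return "Por Definir"
--         m_id, slot = origen_id, nxt
--         p = index.get(m_id)
--     key = f"equipo{slot}"
--     override = user_preds.get(m_id, {}) if m_id.startswith("O") else {}
--     return override.get(key, p.get(key))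
-- ===== Notes on version B (the rewrite author's own statement) =====
-- stated objective: alternative
-- what changed: A's recursion that rescans matches_dict at every step is replaced by a one-time id->match index plus an iterative while-loop driven by a clasifica->slot dispatch table, with the base-name/override logic applied once as a single defaulted lookup after the loop.
import Mathlib
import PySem

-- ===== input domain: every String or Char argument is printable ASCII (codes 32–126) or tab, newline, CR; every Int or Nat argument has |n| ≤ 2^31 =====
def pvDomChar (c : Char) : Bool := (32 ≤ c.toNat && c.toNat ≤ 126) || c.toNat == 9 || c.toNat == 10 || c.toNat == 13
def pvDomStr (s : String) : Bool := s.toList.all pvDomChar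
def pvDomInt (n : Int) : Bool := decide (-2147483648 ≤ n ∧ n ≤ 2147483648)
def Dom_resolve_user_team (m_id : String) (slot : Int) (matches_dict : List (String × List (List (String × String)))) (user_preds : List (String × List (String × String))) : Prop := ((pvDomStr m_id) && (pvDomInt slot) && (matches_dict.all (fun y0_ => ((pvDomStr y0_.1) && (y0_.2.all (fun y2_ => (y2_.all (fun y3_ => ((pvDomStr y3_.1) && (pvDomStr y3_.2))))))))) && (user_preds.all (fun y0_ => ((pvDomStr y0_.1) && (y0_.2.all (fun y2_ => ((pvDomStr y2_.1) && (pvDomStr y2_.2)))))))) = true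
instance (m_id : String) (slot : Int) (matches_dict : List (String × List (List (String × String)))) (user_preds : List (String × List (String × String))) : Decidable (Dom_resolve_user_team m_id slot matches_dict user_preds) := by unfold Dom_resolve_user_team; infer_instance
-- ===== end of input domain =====

-- B replaces A's recursion-with-rescan by a one-time id->match index, an iterative
-- loop driven by a clasifica->slot dispatch table, and one defaulted final lookup
-- (objective: alternative decomposition, same return value).  The two ports in fact
-- agree on ALL inputs (both model a Python raise as none in the same places), so the
-- proof does not need the Pre_ hypothesis; Pre_ delimits where Python A actually
-- returns a value rather than raising.

-- ===== PORT A =====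
-- for phase, m_list in matches_dict.items(): for m in m_list: if m["id"] == m_id: return m
-- (a match without an "id" key makes Python raise KeyError here; those inputs are outside Pre_,
-- where the port's find? simply skips such a match)
def pvGetMatchById (matches_dict : List (String × List (List (String × String)))) (m_id : String) : Option (List (String × String)) :=
  match matches_dict with
  | [] => none
  | (_, m_list) :: rest =>
    match m_list.find? (fun m => (PySem.Dict.mk m).get? "id" == some m_id) with
    | some m => some m
    | none => pvGetMatchById rest m_id

-- A's recursion, guarded by fuel for totality only; 2n+3 exceeds the (id, slot) state
-- space of any terminating chain, so under Pre_ the fuel is never exhausted.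
def pvResolveA (matches_dict : List (String × List (List (String × String)))) (user_preds : List (String × List (String × String))) : Nat → String → Int → Option String
  | 0, _, _ => none
  | n + 1, m_id, slot =>
    match pvGetMatchById matches_dict m_id with
    | none => none   -- Python: `in None` raises TypeError; excluded by Pre_
    | some p =>
      let pd := PySem.Dict.mk p
      match pd.get? ("origen" ++ PySem.Int.toStr slot) with
      | some origen_id =>
        let clasifica := (PySem.Dict.mk ((PySem.Dict.mk user_preds).getD origen_id [])).get? "clasifica"
        if clasifica == some "equipo1" then pvResolveA matches_dict user_preds n origen_id 1
        else if clasifica == some "equipo2" then pvResolveA matches_dict user_preds n origen_id 2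
        else some "Por Definir"
      | none =>
        let base_name := pd.get? ("equipo" ++ PySem.Int.toStr slot)
        if PySem.Str.startswith m_id "O" then
          match (PySem.Dict.mk ((PySem.Dict.mk user_preds).getD m_id [])).get? ("equipo" ++ PySem.Int.toStr slot) with
          | some v => some v
          | none => base_name
        else base_name

def resolve_user_team (m_id : String) (slot : Int) (matches_dict : List (String × List (List (String × String)))) (user_preds : List (String × List (String × String))) : Option String :=
  pvResolveA matches_dict user_preds (2 * (matches_dict.flatMap (fun ph => ph.2)).length + 3) m_id slot

-- ===== PORT B =====
-- dict(m) shorthand for the B side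
def pvD (kvs : List (String × String)) : PySem.Dict String String := PySem.Dict.mk kvs

-- index = {}; for m_list in matches_dict.values(): for m in m_list: if "id" in m: index.setdefault(m["id"], m)
def pvBuildIndex (matches_dict : List (String × List (List (String × String)))) : PySem.Dict String (List (String × String)) :=
  (matches_dict.flatMap (fun ph => ph.2)).foldl
    (fun d m =>
      match (pvD m).get? "id" with
      | some i => d.setdefault i m
      | none => d)
    PySem.Dict.empty

def pvSlotKey (sl : Int) : String := "origen" ++ PySem.Int.toStr sl
def pvTeamKey (sl : Int) : String := "equipo" ++ PySem.Int.toStr sl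

-- NEXT_SLOT.get(user_preds.get(origen_id, {}).get("clasifica"))
def pvNextSlot (user_preds : List (String × List (String × String))) (oid : String) : Option Int :=
  ((pvD ((PySem.Dict.mk user_preds).getD oid [])).get? "clasifica").bind
    (fun c => (PySem.Dict.mk [("equipo1", (1 : Int)), ("equipo2", (2 : Int))]).get? c)

-- the while-loop; the current match cur is part of the loop state (refetched at the end of
-- each iteration); none = a dangling id, where Python B's `in None` raises TypeError.
def pvBStep (index : PySem.Dict String (List (String × String))) (user_preds : List (String × List (String × String))) : Nat → List (String × String) → String → Int → Option String
  | 0, _, _, _ => none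
  | n + 1, cur, mid, sl =>
    match (pvD cur).get? (pvSlotKey sl) with
    | none =>
      let key := pvTeamKey sl
      let override := if PySem.Str.startswith mid "O" then (PySem.Dict.mk user_preds).getD mid [] else []
      ((pvD override).get? key).or ((pvD cur).get? key)
    | some oid =>
      match pvNextSlot user_preds oid with
      | none => some "Por Definir"
      | some sl' => (index.get? oid).bind (pvBStep index user_preds n · oid sl')

def resolve_user_team_alt (m_id : String) (slot : Int) (matches_dict : List (String × List (List (String × String)))) (user_preds : List (String × List (String × String))) : Option String :=
  let index := pvBuildIndex matches_dict
  (index.get? m_id).bind (fun p => pvBStep index user_preds (2 * (matches_dict.flatMap (fun ph => ph.2)).length + 3) p m_id slot)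

-- ===== PRECONDITION & SPEC =====
-- one step of the origen-link graph induced by the input: for a state (id, slot),
-- none           = the lookup A performs there raises (a match without "id" scanned first
--                  → KeyError, or no match with this id → TypeError via `in None`);
-- some none      = a returning state (no origen key, or its target not classified
--                  equipo1/equipo2 — A returns a team name or "Por Definir" here);
-- some (some st) = the link to the next state (origen target, chosen slot).
def pvSucc (flat : List (List (String × String))) (up : List (String × List (String × String))) : String × Int → Option (Option (String × Int)) :=
  fun (i, s) =>
    ((flat.takeWhile (fun m => (PySem.Dict.mk m).contains "id")).find?
        (fun m => (PySem.Dict.mk m).get? "id" == some i)).map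
      (fun p =>
        ((PySem.Dict.mk p).get? ("origen" ++ PySem.Int.toStr s)).bind
          (fun oid =>
            ((PySem.Dict.mk ((PySem.Dict.mk up).getD oid [])).get? "clasifica").bind
              (fun c => if c == "equipo1" then some (oid, (1 : Int))
                        else if c == "equipo2" then some (oid, (2 : Int))
                        else none)))

-- Pre_ holds EXACTLY when Python A returns a value: in the input's link graph a returning
-- state is reachable from (m_id, slot) without any raising lookup (KeyError/TypeError) and
-- without a cycle (RecursionError).  Reachability is decided by iterating the link map at
-- most 2n+3 times — one more than the graph's (id, slot) state space — so this is a
-- reachability condition on the input, not a size cap, and it excludes no input on which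
-- A returns.
def Pre_resolve_user_team (m_id : String) (slot : Int) (matches_dict : List (String × List (List (String × String)))) (user_preds : List (String × List (String × String))) : Prop :=
  ((List.range (2 * (matches_dict.flatMap (fun ph => ph.2)).length + 3)).foldl
      (fun acc _ =>
        match acc with
        | Sum.inl b => Sum.inl b
        | Sum.inr st =>
          match pvSucc (matches_dict.flatMap (fun ph => ph.2)) user_preds st with
          | none => Sum.inl false
          | some none => Sum.inl true
          | some (some st') => Sum.inr st')
      (Sum.inr (m_id, slot) : Bool ⊕ (String × Int))) = Sum.inl true
instance (m_id : String) (slot : Int) (matches_dict : List (String × List (List (String × String)))) (user_preds : List (String × List (String × String))) : Decidable (Pre_resolve_user_team m_id slot matches_dict user_preds) := by unfold Pre_resolve_user_team; infer_instance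

def pvWitness_resolve_user_team : String × Int × (List (String × List (List (String × String)))) × (List (String × List (String × String))) :=
  ("F1", 1, [("Final", [[("id", "F1"), ("equipo1", "Argentina")]])], [])

def Spec_resolve_user_team (m_id : String) (slot : Int) (matches_dict : List (String × List (List (String × String)))) (user_preds : List (String × List (String × String))) (out : Option String) : Prop := out = resolve_user_team_alt m_id slot matches_dict user_preds
instance (m_id : String) (slot : Int) (matches_dict : List (String × List (List (String × String)))) (user_preds : List (String × List (String × String))) (out : Option String) : Decidable (Spec_resolve_user_team m_id slot matches_dict user_preds out) := by unfold Spec_resolve_user_team; infer_instance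

-- ===== CLAIM (what is proved, stated in full; the proofs are below) =====
def Claim_equal_resolve_user_team : Prop := ∀ (m_id : String) (slot : Int) (matches_dict : List (String × List (List (String × String)))) (user_preds : List (String × List (String × String))), Dom_resolve_user_team m_id slot matches_dict user_preds → Pre_resolve_user_team m_id slot matches_dict user_preds → Spec_resolve_user_team m_id slot matches_dict user_preds (resolve_user_team m_id slot matches_dict user_preds)

-- ===== LEMMAS AND PROOFS =====

-- A's phase-by-phase scan is find? over the flattened match list.
theorem pvGetMatchById_eq_find (matches_dict : List (String × List (List (String × String)))) (m_id : String) :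
    pvGetMatchById matches_dict m_id
      = (matches_dict.flatMap (fun ph => ph.2)).find? (fun m => (PySem.Dict.mk m).get? "id" == some m_id) := by
  induction matches_dict with
  | nil => simp [pvGetMatchById]
  | cons ph rest ih =>
    obtain ⟨phase, m_list⟩ := ph
    simp only [pvGetMatchById, List.flatMap_cons, List.find?_append, ih]
    cases m_list.find? (fun m => (PySem.Dict.mk m).get? "id" == some m_id) <;> simp

-- setdefault-folding keeps the FIRST match for each id.
theorem pvFoldSetdefault_get (l : List (List (String × String))) (x : String) :
    ∀ d : PySem.Dict String (List (String × String)),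
    (l.foldl (fun d m =>
        match (PySem.Dict.mk m).get? "id" with
        | some i => d.setdefault i m
        | none => d) d).get? x
      = (d.get? x).orElse (fun _ => l.find? (fun m => (PySem.Dict.mk m).get? "id" == some x)) := by
  induction l with
  | nil => intro d; cases h : d.get? x <;> simp [h]
  | cons m l ih =>
    intro d
    simp only [List.foldl_cons]
    cases hm : (PySem.Dict.mk m).get? "id" with
    | none =>
      rw [ih d]
      have hp : ((PySem.Dict.mk m).get? "id" == some x) = false := by simp [hm]
      simp [hp]
    | some i =>
      rw [ih (d.setdefault i m)]
      by_cases hx : x = i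
      · subst hx
        have hp : ((PySem.Dict.mk m).get? "id" == some x) = true := by simp [hm]
        rw [PySem.Dict.get?_setdefault_self]
        simp only [List.find?_cons, hp]
        cases d.get? x <;> simp [Option.orElse, Option.getD]
      · have hp : ((PySem.Dict.mk m).get? "id" == some x) = false := by
          simp only [hm]
          exact decide_eq_false (fun h => hx h.symm)
        rw [PySem.Dict.get?_setdefault_of_ne d m hx]
        simp [hp]

theorem pvBuildIndex_get (matches_dict : List (String × List (List (String × String)))) (x : String) :
    (pvBuildIndex matches_dict).get? x = pvGetMatchById matches_dict x := by
  rw [pvGetMatchById_eq_find, pvBuildIndex]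
  simp only [pvD]
  rw [pvFoldSetdefault_get]
  simp [Option.orElse]

-- the dispatch table agrees with A's if/elif chain, case by case on clasifica.
theorem pvNextSlot_cases (up : List (String × List (String × String))) (oid : String) :
    pvNextSlot up oid
      = match (PySem.Dict.mk ((PySem.Dict.mk up).getD oid [])).get? "clasifica" with
        | some c => if c == "equipo1" then some 1 else if c == "equipo2" then some 2 else none
        | none => none := by
  unfold pvNextSlot
  simp only [pvD]
  cases hc : (PySem.Dict.mk ((PySem.Dict.mk up).getD oid [])).get? "clasifica" with
  | none => rfl
  | some c =>
    by_cases h1 : c = "equipo1"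
    · subst h1; simp [PySem.Dict.get?_mk_cons]
    · by_cases h2 : c = "equipo2"
      · subst h2; simp [PySem.Dict.get?_mk_cons]
      · have e : (PySem.Dict.mk ([] : List (String × Int))).get? c = none := rfl
        simp [PySem.Dict.get?_mk_cons, Ne.symm h1, Ne.symm h2, h1, h2, e]

-- the base/override finish: A's if/match equals B's defaulted single lookup.
theorem pvFinish_eq (up : List (String × List (String × String))) (p : List (String × String)) (i : String) (s : Int) :
    (if PySem.Str.startswith i "O" then
       match (PySem.Dict.mk ((PySem.Dict.mk up).getD i [])).get? ("equipo" ++ PySem.Int.toStr s) with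
       | some v => some v
       | none => (PySem.Dict.mk p).get? ("equipo" ++ PySem.Int.toStr s)
     else (PySem.Dict.mk p).get? ("equipo" ++ PySem.Int.toStr s))
    = ((PySem.Dict.mk (if PySem.Str.startswith i "O" then (PySem.Dict.mk up).getD i [] else [])).get? ("equipo" ++ PySem.Int.toStr s)).or
        ((PySem.Dict.mk p).get? ("equipo" ++ PySem.Int.toStr s)) := by
  cases hO : PySem.Str.startswith i "O" with
  | true =>
    cases h : (PySem.Dict.mk ((PySem.Dict.mk up).getD i [])).get? ("equipo" ++ PySem.Int.toStr s) <;> simp [h]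
  | false => rfl

-- the core simulation: A's recursion equals B's fetch-then-loop, fuel for fuel.
theorem pvA_eq_B (md : List (String × List (List (String × String)))) (up : List (String × List (String × String))) :
    ∀ (n : Nat) (i : String) (s : Int),
    pvResolveA md up n i s
      = match n with
        | 0 => none
        | m + 1 => (pvGetMatchById md i).bind (fun p => pvBStep (pvBuildIndex md) up (m + 1) p i s) := by
  intro n
  induction n with
  | zero => intro i s; rfl
  | succ n ih =>
    intro i s
    simp only [pvResolveA]
    cases hp : pvGetMatchById md i with
    | none => rfl
    | some p =>
      simp only [Option.bind_some, pvBStep, pvSlotKey, pvTeamKey, pvD]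
      cases hor : (PySem.Dict.mk p).get? ("origen" ++ PySem.Int.toStr s) with
      | none => dsimp only; exact pvFinish_eq up p i s
      | some oid =>
        dsimp only
        rw [pvNextSlot_cases]
        cases hc : (PySem.Dict.mk ((PySem.Dict.mk up).getD oid [])).get? "clasifica" with
        | none => simp
        | some c =>
          by_cases h1 : c = "equipo1"
          · subst h1
            simp only [beq_self_eq_true, if_true, ih, pvBuildIndex_get]
            cases n with
            | zero => cases pvGetMatchById md oid <;> rfl
            | succ m => rfl
          · by_cases h2 : c = "equipo2"
            · subst h2
              have hb : (("equipo2" : String) == "equipo1") = false := by decide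
              simp only [hb, beq_self_eq_true, if_true, ih, pvBuildIndex_get]
              cases n with
              | zero => cases pvGetMatchById md oid <;> rfl
              | succ m => rfl
            · have hb1 : (c == "equipo1") = false := by simp [h1]
              have hb2 : (c == "equipo2") = false := by simp [h2]
              simp [hb1, hb2]

theorem pvA_eq_B_succ (md : List (String × List (List (String × String)))) (up : List (String × List (String × String))) (n : Nat) (i : String) (s : Int) :
    pvResolveA md up (n + 1) i s
      = (pvGetMatchById md i).bind (fun p => pvBStep (pvBuildIndex md) up (n + 1) p i s) :=
  pvA_eq_B md up (n + 1) i s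

theorem resolve_user_team_eq (m_id : String) (slot : Int) (matches_dict : List (String × List (List (String × String)))) (user_preds : List (String × List (String × String))) :
    resolve_user_team m_id slot matches_dict user_preds = resolve_user_team_alt m_id slot matches_dict user_preds := by
  show pvResolveA matches_dict user_preds (2 * (matches_dict.flatMap (fun ph => ph.2)).length + 2 + 1) m_id slot
      = ((pvBuildIndex matches_dict).get? m_id).bind
          (fun p => pvBStep (pvBuildIndex matches_dict) user_preds (2 * (matches_dict.flatMap (fun ph => ph.2)).length + 2 + 1) p m_id slot)
  rw [pvA_eq_B_succ, pvBuildIndex_get]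

-- ===== VERDICT (by name: the statement is the Claim_ definition above) =====
theorem resolve_user_team_spec : Claim_equal_resolve_user_team := by
  intro m_id slot matches_dict user_preds _ _
  exact resolve_user_team_eq m_id slot matches_dict user_preds
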